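-- pv_equiv track=rewrite | github.com/sloppy-cat/ssaf_algorithm | 200302.py | f
-- ===== SOURCE A (Python) =====
-- def f(nums, idx, r, op1, op2, op3, op4):
--     return_box = []
--     if idx == len(nums):
--         return [r]
--     if op1:
--         return_box += f(nums, idx+1, r+nums[idx], op1-1, op2, op3, op4)
--     if op2:
--         return_box += f(nums, idx+1, r-nums[idx], op1, op2-1, op3, op4)
--     if op3:
--         return_box += f(nums, idx+1, r*nums[idx], op1, op2, op3-1, op4)
--     if op4:
--         return_box += f(nums, idx+1, int(r/nums[idx]), op1, op2, op3, op4-1)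
--     return return_box
-- ===== SOURCE B (Python) =====
-- def f(nums, idx, r, op1, op2, op3, op4):
--     out = []
--     stack = [(idx, r, op1, op2, op3, op4)]
--     while stack:
--         i, v, a, b, c, d = stack.pop()
--         if i == len(nums):
--             out.append(v)
--             continue
--         # push in reverse order so '+' is explored first (A's preorder)
--         if d:
--             stack.append((i + 1, int(v / nums[i]), a, b, c, d - 1))
--         if c:
--             stack.append((i + 1, v * nums[i], a, b, c - 1, d))
--         if b:
--             stack.append((i + 1, v - nums[i], a, b - 1, c, d))
--         if a:
--             stack.append((i + 1, v + nums[i], a - 1, b, c, d))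
--     return out
-- ===== Notes on version B (the rewrite author's own statement) =====
-- stated objective: alternative
-- what changed: Replaces A's four-way recursive DFS by an iterative explicit-stack loop that pushes the child states in reverse operation order so popping reproduces A's preorder emission exactly.
-- outside the precondition, e.g. on f([1, 0], 0, 5, 0, 0, 0, 1): A returns [], B returns []
import Mathlib
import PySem

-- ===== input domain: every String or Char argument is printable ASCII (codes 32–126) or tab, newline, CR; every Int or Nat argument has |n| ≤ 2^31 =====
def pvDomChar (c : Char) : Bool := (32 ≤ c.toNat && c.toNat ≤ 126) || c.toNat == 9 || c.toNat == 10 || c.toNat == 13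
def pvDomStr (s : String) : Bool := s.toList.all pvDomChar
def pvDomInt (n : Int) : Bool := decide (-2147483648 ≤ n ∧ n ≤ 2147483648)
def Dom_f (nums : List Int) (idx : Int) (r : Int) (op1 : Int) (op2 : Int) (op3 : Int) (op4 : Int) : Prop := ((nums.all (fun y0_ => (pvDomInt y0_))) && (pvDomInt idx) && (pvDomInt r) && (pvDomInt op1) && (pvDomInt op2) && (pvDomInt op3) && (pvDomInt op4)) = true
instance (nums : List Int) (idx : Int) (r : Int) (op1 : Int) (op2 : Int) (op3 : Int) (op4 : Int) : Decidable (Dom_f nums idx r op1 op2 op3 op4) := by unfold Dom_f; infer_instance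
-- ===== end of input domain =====

-- B replaces A's recursive DFS by an explicit-stack loop (push children in reverse order so the
-- '+' branch is popped first), same preorder emission; objective: alternative (same cost).

-- ===== PORT A =====
-- Hand port of Python's int(r / x) for x ≠ 0 (PySem has no primitive for true division of big
-- ints): CPython's int.__truediv__ correctly rounds the exact rational r/x to an IEEE double
-- (round-half-even at 53 significant bits), and int() then truncates toward zero.  The code
-- below performs exactly that rounding on integers (quotient to 55+ bits with a sticky bit,
-- then round-half-even); it is exact whenever the double result is finite and of magnitude
-- ≥ 2^-1022 or < 1 (truncation maps the whole subnormal range to 0 either way) — i.e. on every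
-- input Pre_f admits.  Validated against CPython on randomized big-int cases.  At x = 0 Python
-- raises ZeroDivisionError (excluded by Pre_f); the function returns 0 there.
def pyTrueDivInt (r x : Int) : Int :=
  if x = 0 then 0
  else
    let s : Int := if (decide (r < 0)) != (decide (x < 0)) then -1 else 1
    let a := r.natAbs
    let b := x.natAbs
    if a = 0 then 0
    else
      let d : Int := ((Nat.log2 a + 1 : Nat) : Int) - ((Nat.log2 b + 1 : Nat) : Int)
      let shift : Int := 55 - d
      let qs : Nat × Bool :=
        if 0 ≤ shift then
          let na := a <<< shift.toNat
          (na / b, decide (na % b ≠ 0))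
        else
          let nb := b <<< (-shift).toNat
          (a / nb, decide (a % nb ≠ 0))
      let q := qs.1
      let sticky := qs.2
      let extra := (Nat.log2 q + 1) - 53
      let half := 2 ^ (extra - 1)
      let lost := q % 2 ^ extra
      let m0 := q / 2 ^ extra
      let m := if half < lost ∨ (lost = half ∧ (sticky = true ∨ m0 % 2 = 1)) then m0 + 1 else m0
      let e : Int := (extra : Int) + d - 55
      let me : Nat × Int := if m = 2 ^ 53 then (2 ^ 52, e + 1) else (m, e)
      let mag : Int := if 0 ≤ me.2 then (me.1 : Int) * 2 ^ me.2.toNat else ((me.1 >>> (-me.2).toNat : Nat) : Int)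
      s * mag

-- A's recursion, fuel = remaining steps + 1 (fuel only makes the recursion total; on every
-- input admitted by Pre_f the fuel is never exhausted).  nums[idx] is Python indexing with
-- wraparound: PySem.List.pyGetD (default 0 is only reached outside Pre_f, where Python raises
-- IndexError).  int(r/nums[idx]) is pyTrueDivInt above.
def fGo (nums : List Int) (fuel : Nat) (idx : Int) (r : Int) (op1 : Int) (op2 : Int) (op3 : Int) (op4 : Int) : List Int :=
  match fuel with
  | 0 => []
  | fuel + 1 =>
    if idx = (nums.length : Int) then [r]
    else
      (if op1 ≠ 0 then fGo nums fuel (idx+1) (r + PySem.List.pyGetD nums idx 0) (op1-1) op2 op3 op4 else []) ++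
      (if op2 ≠ 0 then fGo nums fuel (idx+1) (r - PySem.List.pyGetD nums idx 0) op1 (op2-1) op3 op4 else []) ++
      (if op3 ≠ 0 then fGo nums fuel (idx+1) (r * PySem.List.pyGetD nums idx 0) op1 op2 (op3-1) op4 else []) ++
      (if op4 ≠ 0 then fGo nums fuel (idx+1) (pyTrueDivInt r (PySem.List.pyGetD nums idx 0)) op1 op2 op3 (op4-1) else [])

def f (nums : List Int) (idx : Int) (r : Int) (op1 : Int) (op2 : Int) (op3 : Int) (op4 : Int) : List Int :=
  fGo nums (((nums.length : Int) - idx).toNat + 1) idx r op1 op2 op3 op4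

-- ===== PORT B =====
-- B's while-loop over an explicit stack, fuel = upper bound on the number of pops
-- (again only for totality; sufficient on every input Pre_f admits).
def fAltGo (nums : List Int) (fuel : Nat) (stack : List (Int × Int × Int × Int × Int × Int)) (out : List Int) : List Int :=
  match fuel with
  | 0 => out
  | fuel + 1 =>
    match stack with
    | [] => out
    | (i, v, a, b, c, d) :: rest =>
      if i = (nums.length : Int) then fAltGo nums fuel rest (out ++ [v])
      else
        let x := PySem.List.pyGetD nums i 0
        let s4 := if d ≠ 0 then (i+1, pyTrueDivInt v x, a, b, c, d-1) :: rest else rest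
        let s3 := if c ≠ 0 then (i+1, v * x, a, b, c-1, d) :: s4 else s4
        let s2 := if b ≠ 0 then (i+1, v - x, a, b-1, c, d) :: s3 else s3
        let s1 := if a ≠ 0 then (i+1, v + x, a-1, b, c, d) :: s2 else s2
        fAltGo nums fuel s1 out

def f_alt (nums : List Int) (idx : Int) (r : Int) (op1 : Int) (op2 : Int) (op3 : Int) (op4 : Int) : List Int :=
  fAltGo nums (5 ^ (((nums.length : Int) - idx).toNat + 1)) [(idx, r, op1, op2, op3, op4)] []

-- ===== PRECONDITION & SPEC =====
-- the list of elements the recursion reads (with Python's negative-index wraparound)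
def pvVisited (nums : List Int) (idx : Int) : List Int :=
  if idx < 0 then nums.drop ((nums.length : Int) + idx).toNat ++ nums else nums.drop idx.toNat
-- additive bound on any intermediate value when no multiplication is enabled
def pvAddB (nums : List Int) (idx : Int) (r : Int) : Nat :=
  r.natAbs + ((pvVisited nums idx).map (fun y => y.natAbs)).sum
-- multiplicative factor completing the general bound (pvAddB * pvMulB dominates every intermediate value)
def pvMulB (nums : List Int) (idx : Int) : Nat :=
  ((pvVisited nums idx).map (fun y => max 1 y.natAbs)).prod
-- Pre_f excludes exactly inputs on which the Python A raises, by sufficient closed-form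
-- conditions, two of them slightly coarse (see cites for excluded inputs on which A returns):
-- (a) IndexError — idx out of range while some operation is still enabled;
-- (b) ZeroDivisionError — a division enabled while a reachable element is 0 (coarse: the zero
--     may sit where no path consumes it with op4 still positive);
-- (c) OverflowError — int(r/x) with a quotient beyond the double range; pvAddB * pvMulB bounds
--     every intermediate value, so < 2^1023 rules it out (coarse: a run staying small can have
--     a large worst-case bound).
-- 2^1023, written as a literal so 'decide' needs no deep power recursion
def pvFloatMax : Nat := 89884656743115795386465259539451236680898848947115328636715040578866337902750481566354238661203768010560056939935696678829394884407208311246423715319737062188883946712432742638151109800623047059726541476042502884419075341171231440736956555270413618581675255342293149119973622969239858152417678164812112068608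
def Pre_f (nums : List Int) (idx : Int) (r : Int) (op1 : Int) (op2 : Int) (op3 : Int) (op4 : Int) : Prop :=
  (op1 = 0 ∧ op2 = 0 ∧ op3 = 0 ∧ op4 = 0) ∨
  idx = (nums.length : Int) ∨
  (-(nums.length : Int) ≤ idx ∧ idx < (nums.length : Int) ∧
    (op4 = 0 ∨ ∀ y ∈ pvVisited nums idx, y ≠ 0) ∧
    ((op3 = 0 ∧ pvAddB nums idx r < pvFloatMax) ∨ pvAddB nums idx r * pvMulB nums idx < pvFloatMax))
instance (nums : List Int) (idx : Int) (r : Int) (op1 : Int) (op2 : Int) (op3 : Int) (op4 : Int) : Decidable (Pre_f nums idx r op1 op2 op3 op4) := by unfold Pre_f; infer_instance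
def pvWitness_f : List Int × Int × Int × Int × Int × Int × Int := ([1, 2], 0, 0, 1, 1, 1, 1)

def Spec_f (nums : List Int) (idx : Int) (r : Int) (op1 : Int) (op2 : Int) (op3 : Int) (op4 : Int) (out : List Int) : Prop := out = f_alt nums idx r op1 op2 op3 op4
instance (nums : List Int) (idx : Int) (r : Int) (op1 : Int) (op2 : Int) (op3 : Int) (op4 : Int) (out : List Int) : Decidable (Spec_f nums idx r op1 op2 op3 op4 out) := by unfold Spec_f; infer_instance

-- ===== CLAIM (what is proved, stated in full; the proofs are below) =====
def Claim_equal_f : Prop := ∀ (nums : List Int) (idx : Int) (r : Int) (op1 : Int) (op2 : Int) (op3 : Int) (op4 : Int), Dom_f nums idx r op1 op2 op3 op4 → Pre_f nums idx r op1 op2 op3 op4 → Spec_f nums idx r op1 op2 op3 op4 (f nums idx r op1 op2 op3 op4)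

-- ===== LEMMAS AND PROOFS =====

-- tree size of one stack state: enough pops to explore it fully
def pvT (nums : List Int) (i : Int) : Nat := 5 ^ (((nums.length : Int) - i).toNat + 1)

def pvSumT (nums : List Int) (stack : List (Int × Int × Int × Int × Int × Int)) : Nat :=
  (stack.map (fun st => pvT nums st.1)).sum

def pvSpecF (nums : List Int) (st : Int × Int × Int × Int × Int × Int) : List Int :=
  fGo nums ((((nums.length : Int) - st.1).toNat) + 1) st.1 st.2.1 st.2.2.1 st.2.2.2.1 st.2.2.2.2.1 st.2.2.2.2.2

-- main invariant: with enough fuel, the stack machine emits, after `out`, the concatenation of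
-- the recursive results of the stacked states, head first
set_option maxHeartbeats 1000000 in
lemma fAltGo_spec (nums : List Int) : ∀ (fuel : Nat) (stack : List (Int × Int × Int × Int × Int × Int)) (out : List Int),
    (∀ st ∈ stack, st.1 ≤ (nums.length : Int)) →
    pvSumT nums stack ≤ fuel →
    fAltGo nums fuel stack out = out ++ (stack.map (pvSpecF nums)).flatten := by
  intro fuel
  induction fuel with
  | zero =>
    intro stack out hok hsum
    match stack with
    | [] => simp [fAltGo]
    | st :: rest =>
      exfalso
      have hp : 0 < pvT nums st.1 := by unfold pvT; positivity
      have : pvSumT nums (st :: rest) = pvT nums st.1 + pvSumT nums rest := by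
        simp [pvSumT]
      omega
  | succ fuel ih =>
    intro stack out hok hsum
    match stack with
    | [] => simp [fAltGo]
    | (i, v, a, b, c, d) :: rest =>
      have hi : i ≤ (nums.length : Int) := hok (i, v, a, b, c, d) (List.mem_cons_self ..)
      have hokr : ∀ st ∈ rest, st.1 ≤ (nums.length : Int) :=
        fun st h => hok st (List.mem_cons_of_mem _ h)
      have hsum' : pvSumT nums ((i, v, a, b, c, d) :: rest) = pvT nums i + pvSumT nums rest := by
        simp [pvSumT]
      by_cases hlen : i = (nums.length : Int)
      · have hstep : fAltGo nums (fuel + 1) ((i, v, a, b, c, d) :: rest) out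
            = fAltGo nums fuel rest (out ++ [v]) := by
          simp [fAltGo, hlen]
        have hp : 0 < pvT nums i := by unfold pvT; positivity
        have hspec : pvSpecF nums (i, v, a, b, c, d) = [v] := by
          simp [pvSpecF, fGo, hlen]
        rw [hstep, ih rest (out ++ [v]) hokr (by omega)]
        simp only [List.map_cons, List.flatten_cons, hspec]
        simp [List.append_assoc]
      · -- expansion step
        have hilt : i < (nums.length : Int) := lt_of_le_of_ne hi hlen
        have hk : ((nums.length : Int) - (i + 1)).toNat + 1 = ((nums.length : Int) - i).toNat := by
          omega
        set x := PySem.List.pyGetD nums i 0 with hx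
        set c4 : Int × Int × Int × Int × Int × Int := (i+1, pyTrueDivInt v x, a, b, c, d-1) with hc4
        set c3 : Int × Int × Int × Int × Int × Int := (i+1, v * x, a, b, c-1, d) with hc3
        set c2 : Int × Int × Int × Int × Int × Int := (i+1, v - x, a, b-1, c, d) with hc2
        set c1 : Int × Int × Int × Int × Int × Int := (i+1, v + x, a-1, b, c, d) with hc1
        set s4 := if d ≠ 0 then c4 :: rest else rest with hs4
        set s3 := if c ≠ 0 then c3 :: s4 else s4 with hs3
        set s2 := if b ≠ 0 then c2 :: s3 else s3 with hs2
        set s1 := if a ≠ 0 then c1 :: s2 else s2 with hs1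
        have hstep : fAltGo nums (fuel + 1) ((i, v, a, b, c, d) :: rest) out
            = fAltGo nums fuel s1 out := by
          conv_lhs => rw [fAltGo]
          rw [if_neg hlen]
        -- child tree size
        have hTc : pvT nums (i + 1) * 5 = pvT nums i := by
          simp only [pvT, ← hk]
          ring
        have hTpos : 0 < pvT nums (i + 1) := by unfold pvT; positivity
        have hok1 : ∀ st ∈ s1, st.1 ≤ (nums.length : Int) := by
          intro st hst
          rw [hs1, hs2, hs3, hs4] at hst
          have hcase : st ∈ [c1, c2, c3, c4] ∨ st ∈ rest := by
            split_ifs at hst <;> simp only [List.mem_cons] at hst ⊢ <;> tauto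
          rcases hcase with h | h
          · simp only [List.mem_cons, List.not_mem_nil, or_false] at h
            rcases h with h | h | h | h <;> subst h <;> simp [hc1, hc2, hc3, hc4] <;> omega
          · exact hokr _ h
        have hsum1 : pvSumT nums s1 ≤ fuel := by
          have h1 : pvSumT nums s1 ≤ 4 * pvT nums (i + 1) + pvSumT nums rest := by
            rw [hs1, hs2, hs3, hs4]
            split_ifs <;> simp [pvSumT, hc1, hc2, hc3, hc4] <;> omega
          omega
        rw [hstep, ih s1 out hok1 hsum1]
        -- identify the emitted lists
        have hchildspec : ∀ (st : Int × Int × Int × Int × Int × Int), st.1 = i + 1 →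
            pvSpecF nums st = fGo nums (((nums.length : Int) - i).toNat) st.1 st.2.1 st.2.2.1 st.2.2.2.1 st.2.2.2.2.1 st.2.2.2.2.2 := by
          intro st h1
          simp only [pvSpecF, h1, hk]
        have hKpos : 1 ≤ ((nums.length : Int) - i).toNat := by omega
        have hunfold : pvSpecF nums (i, v, a, b, c, d)
            = (if a ≠ 0 then pvSpecF nums c1 else []) ++
              (if b ≠ 0 then pvSpecF nums c2 else []) ++
              (if c ≠ 0 then pvSpecF nums c3 else []) ++
              (if d ≠ 0 then pvSpecF nums c4 else []) := by
          obtain ⟨K, hK⟩ : ∃ K, ((nums.length : Int) - i).toNat = K + 1 := ⟨((nums.length : Int) - i).toNat - 1, by omega⟩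
          rw [hchildspec c1 rfl, hchildspec c2 rfl, hchildspec c3 rfl, hchildspec c4 rfl]
          simp only [pvSpecF, hK, hc1, hc2, hc3, hc4, hx]
          conv_lhs => rw [fGo]
          rw [if_neg hlen]
        rw [List.map_cons, List.flatten_cons, hunfold, hs1, hs2, hs3, hs4]
        split_ifs <;>
          simp only [List.map_cons, List.flatten_cons, List.append_assoc, List.nil_append,
            List.append_nil]

theorem pv_main : ∀ (nums : List Int) (idx : Int) (r : Int) (op1 : Int) (op2 : Int) (op3 : Int) (op4 : Int), Pre_f nums idx r op1 op2 op3 op4 → f nums idx r op1 op2 op3 op4 = f_alt nums idx r op1 op2 op3 op4 := by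
  intro nums idx r op1 op2 op3 op4 hpre
  by_cases hile : idx ≤ (nums.length : Int)
  · have h := fAltGo_spec nums (5 ^ (((nums.length : Int) - idx).toNat + 1))
      [(idx, r, op1, op2, op3, op4)] [] (by simpa using hile)
      (by simp [pvSumT, pvT])
    unfold f f_alt
    rw [h]
    simp [pvSpecF]
  · -- idx beyond the list: Pre_f forces all four op counters to be zero; both sides compute []
    have hz : op1 = 0 ∧ op2 = 0 ∧ op3 = 0 ∧ op4 = 0 := by
      rcases hpre with h | h | h
      · exact h
      · exact absurd h (by omega)
      · exact absurd h.2.1 (by omega)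
    obtain ⟨h1, h2, h3, h4⟩ := hz
    have hne : idx ≠ (nums.length : Int) := by omega
    have ht : (((nums.length : Int) - idx).toNat) = 0 := by omega
    subst h1; subst h2; subst h3; subst h4
    simp [f, f_alt, ht, fGo, fAltGo, hne]

-- ===== VERDICT (by name: the statement is the Claim_ definition above) =====
theorem f_spec : Claim_equal_f := by
  intro nums idx r op1 op2 op3 op4 _ hpre
  unfold Spec_f
  exact pv_main nums idx r op1 op2 op3 op4 hpre
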